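-- pv_equiv track=rewrite | github.com/devarshi-lab/Python | DiffFactorNonFactor.py | DiffFactorNonFactor
-- ===== SOURCE A (Python) =====
-- def DiffFactorNonFactor(value):
-- 	iFactor = 0
-- 	iNonfactor = 0
-- 	for i in range(1,value):
-- 		if(value % i == 0):
-- 			iFactor += i
-- 		else:
-- 			iNonfactor += i;
-- 	return (iNonfactor-iFactor)
-- ===== SOURCE B (Python) =====
-- def DiffFactorNonFactor(value):
--     # Closed-form triangular total minus twice the proper-divisor sum,
--     # found by sqrt divisor pairing: O(sqrt n) instead of O(n).
--     if value < 2: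
--         return 0
--     total = (value - 1) * value // 2
--     fac = 0
--     d = 1
--     while d * d <= value:
--         if value % d == 0:
--             q = value // d
--             fac += d
--             if q != d and q != value:
--                 fac += q
--         d += 1
--     return total - 2 * fac
-- ===== Notes on version B (the rewrite author's own statement) =====
-- stated objective: faster
-- what changed: Replaces the O(n) scan of 1..n-1 with the triangular-number closed form minus twice the proper-divisor sum computed by sqrt divisor pairing.
import Mathlib
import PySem

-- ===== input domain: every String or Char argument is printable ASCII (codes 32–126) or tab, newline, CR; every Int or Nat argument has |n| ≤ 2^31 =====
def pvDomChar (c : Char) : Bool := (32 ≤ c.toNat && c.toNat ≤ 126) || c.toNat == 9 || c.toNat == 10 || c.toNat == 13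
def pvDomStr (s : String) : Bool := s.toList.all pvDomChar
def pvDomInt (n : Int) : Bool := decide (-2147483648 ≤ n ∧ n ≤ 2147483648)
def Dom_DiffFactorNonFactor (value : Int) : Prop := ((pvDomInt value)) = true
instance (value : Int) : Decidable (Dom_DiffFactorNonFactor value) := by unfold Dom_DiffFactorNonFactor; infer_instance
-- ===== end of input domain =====

-- B replaces A's O(n) scan by the triangular closed form minus twice the
-- proper-divisor sum obtained by sqrt divisor pairing (O(sqrt n)).

-- ===== PORT A =====
def DiffFactorNonFactor (value : Int) : Int :=
  let s := (PySem.List.pyRange 1 value 1).foldl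
    (fun (st : Int × Int) i =>
      if PySem.Int.mod value i = 0 then (st.1 + i, st.2) else (st.1, st.2 + i))
    (0, 0)
  s.2 - s.1

-- ===== PORT B =====
-- while d*d <= value: … ; d += 1   (terminates since d ≤ d*d ≤ value)
def pvFacLoop (value : Int) (d : Int) (fac : Int) : Int :=
  if h : d * d ≤ value then
    pvFacLoop value (d + 1)
      (if PySem.Int.mod value d = 0 then
        let q := PySem.Int.floordiv value d
        let f := fac + d
        if q ≠ d ∧ q ≠ value then f + q else f
      else fac)
  else fac
termination_by (value + 1 - d).toNat
decreasing_by
  have hdd : d ≤ d * d := by nlinarith [sq_nonneg (2 * d - 1)]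
  omega

def DiffFactorNonFactor_alt (value : Int) : Int :=
  if value < 2 then 0
  else
    let total := PySem.Int.floordiv ((value - 1) * value) 2
    total - 2 * pvFacLoop value 1 0

-- ===== PRECONDITION & SPEC =====
def Spec_DiffFactorNonFactor (value : Int) (out : Int) : Prop := out = DiffFactorNonFactor_alt value
instance (value : Int) (out : Int) : Decidable (Spec_DiffFactorNonFactor value out) := by unfold Spec_DiffFactorNonFactor; infer_instance

-- ===== CLAIM (what is proved, stated in full; the proofs are below) =====
def Claim_equal_DiffFactorNonFactor : Prop := ∀ (value : Int), Dom_DiffFactorNonFactor value → Spec_DiffFactorNonFactor value (DiffFactorNonFactor value)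

-- ===== LEMMAS AND PROOFS =====

-- contribution of one step of B's sqrt loop, at the Nat level
def pvContrib (n k : Nat) : Nat :=
  if k ∣ n then k + (if n / k ≠ k ∧ n / k ≠ n then n / k else 0) else 0

-- A's fold components: iFactor accumulates divisors, iNonfactor the rest
lemma foldA_eq (value : Int) (l : List Int) (f nf : Int) :
    l.foldl (fun (st : Int × Int) i =>
      if PySem.Int.mod value i = 0 then (st.1 + i, st.2) else (st.1, st.2 + i)) (f, nf)
    = (f + (l.map (fun i => if PySem.Int.mod value i = 0 then i else 0)).sum,
       nf + (l.map (fun i => if PySem.Int.mod value i = 0 then 0 else i)).sum) := by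
  induction l generalizing f nf with
  | nil => simp
  | cons a t ih =>
    by_cases h : PySem.Int.mod value a = 0 <;> simp [h, ih] <;> ring

lemma list_range_map_sum {M : Type} [AddCommMonoid M] (f : Nat → M) (m : Nat) :
    ((List.range m).map f).sum = ∑ k ∈ Finset.range m, f k := by
  induction m with
  | zero => simp
  | succ m ih =>
    rw [List.range_succ, List.map_append, List.sum_append, Finset.sum_range_succ, ih]
    simp

-- B's while loop sums pvContrib over d..sqrt n
lemma facLoop_list (n : Nat) (hn : 2 ≤ n) :
    ∀ (m : Nat) (d fac : Int), 1 ≤ d → ((Nat.sqrt n : Int) + 1 - d).toNat = m →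
    pvFacLoop (n : Int) d fac
      = fac + ((PySem.List.pyRange d ((Nat.sqrt n : Int) + 1) 1).map
          (fun i => (pvContrib n i.toNat : Int))).sum := by
  intro m
  induction m with
  | zero =>
    intro d fac hd hm
    have hds : (Nat.sqrt n : Int) + 1 ≤ d := by omega
    have hgt : ¬ d * d ≤ (n : Int) := by
      have h1 : Nat.sqrt n < d.toNat := by omega
      have h2 : n < d.toNat * d.toNat := Nat.sqrt_lt.mp h1
      have hdn : d = (d.toNat : Int) := by omega
      rw [hdn]
      exact_mod_cast Nat.not_le.mpr h2
    rw [pvFacLoop, dif_neg hgt, PySem.List.pyRange_one_eq_nil hds]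
    simp
  | succ m ih =>
    intro d fac hd hm
    have hdd : d * d ≤ (n : Int) := by
      have h1 : d.toNat ≤ Nat.sqrt n := by omega
      have h2 := Nat.le_sqrt.mp h1
      have hdn : d = (d.toNat : Int) := by omega
      rw [hdn]
      exact_mod_cast h2
    have hlt : d < (Nat.sqrt n : Int) + 1 := by omega
    rw [pvFacLoop, dif_pos hdd, PySem.List.pyRange_one_cons hlt,
        ih (d + 1) _ (by omega) (by omega)]
    simp only [List.map_cons, List.sum_cons]
    have hk : d = ((d.toNat : Nat) : Int) := by omega
    by_cases hdvd : PySem.Int.mod (n : Int) d = 0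
    · have hdvdN : d.toNat ∣ n := by
        have h := (PySem.Int.mod_eq_zero_iff_dvd (n : Int) d).mp hdvd
        rw [hk] at h
        exact_mod_cast h
      have hq : PySem.Int.floordiv (n : Int) d = ((n / d.toNat : Nat) : Int) := by
        rw [hk]
        exact_mod_cast PySem.Int.floordiv_natCast n d.toNat
      have hcont : ((pvContrib n d.toNat : Nat) : Int)
          = (d.toNat : Int) + (if n / d.toNat ≠ d.toNat ∧ n / d.toNat ≠ n
              then ((n / d.toNat : Nat) : Int) else 0) := by
        simp [pvContrib, hdvdN, apply_ite (fun x : Nat => (x : Int))]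
      rw [if_pos hdvd, hcont, hq]
      by_cases hc : n / d.toNat ≠ d.toNat ∧ n / d.toNat ≠ n
      · have hcI : ((n / d.toNat : Nat) : Int) ≠ d ∧ ((n / d.toNat : Nat) : Int) ≠ (n : Int) := by
          constructor
          · intro h; exact hc.1 (by rw [hk] at h; exact_mod_cast h)
          · intro h; exact hc.2 (by exact_mod_cast h)
        rw [if_pos hcI, if_pos hc, ← hk]
        ring
      · have hcI : ¬ (((n / d.toNat : Nat) : Int) ≠ d ∧ ((n / d.toNat : Nat) : Int) ≠ (n : Int)) := by
          intro h
          apply hc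
          constructor
          · intro he; exact h.1 (by rw [hk]; exact_mod_cast he)
          · intro he; exact h.2 (by exact_mod_cast he)
        rw [if_neg hcI, if_neg hc, ← hk]
        ring
    · have hndvd : ¬ d.toNat ∣ n := by
        intro hc
        apply hdvd
        rw [PySem.Int.mod_eq_zero_iff_dvd, hk]
        exact_mod_cast hc
      have hcont : ((pvContrib n d.toNat : Nat) : Int) = 0 := by
        simp [pvContrib, hndvd]
      rw [if_neg hdvd, hcont]
      ring

-- sqrt-pairing: the loop's contributions over 1..sqrt n sum to the proper-divisor sum
lemma pairing (n : Nat) (hn : 2 ≤ n) :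
    ∑ k ∈ Finset.Ico 1 (Nat.sqrt n + 1), pvContrib n k = ∑ k ∈ n.properDivisors, k := by
  have hn0 : n ≠ 0 := by omega
  have h1 : ∑ k ∈ Finset.Ico 1 (Nat.sqrt n + 1), pvContrib n k
      = ∑ k ∈ (Finset.Ico 1 (Nat.sqrt n + 1)).filter (fun k => k ∣ n),
          (k + (if n / k ≠ k ∧ n / k ≠ n then n / k else 0)) := by
    rw [Finset.sum_filter]
    exact Finset.sum_congr rfl (fun k _ => by simp [pvContrib])
  have hfilter_eq : (Finset.Ico 1 (Nat.sqrt n + 1)).filter (fun k => k ∣ n)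
      = n.divisors.filter (fun k => k * k ≤ n) := by
    ext k
    simp only [Finset.mem_filter, Finset.mem_Ico, Nat.mem_divisors, Nat.lt_succ_iff]
    constructor
    · rintro ⟨⟨h1k, h2k⟩, hdvd⟩
      exact ⟨⟨hdvd, hn0⟩, Nat.le_sqrt.mp h2k⟩
    · rintro ⟨⟨hdvd, -⟩, hkk⟩
      have hk0 : k ≠ 0 := by
        rintro rfl
        exact hn0 (Nat.eq_zero_of_zero_dvd hdvd)
      exact ⟨⟨by omega, Nat.le_sqrt.mpr hkk⟩, hdvd⟩
  have h2 : ∑ k ∈ n.divisors.filter (fun k => k * k ≤ n),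
        (if n / k ≠ k ∧ n / k ≠ n then n / k else 0)
      = ∑ k ∈ n.divisors.filter (fun k => k * k < n ∧ k ≠ 1), n / k := by
    rw [← Finset.sum_filter, Finset.filter_filter]
    apply Finset.sum_congr _ (fun _ _ => rfl)
    ext k
    simp only [Finset.mem_filter, Nat.mem_divisors]
    constructor
    · rintro ⟨⟨hdvd, h0⟩, hkk, hne1, hne2⟩
      have hk0 : 0 < k := by
        rcases Nat.eq_zero_or_pos k with rfl | h
        · exact absurd (Nat.eq_zero_of_zero_dvd hdvd) hn0
        · exact h
      refine ⟨⟨hdvd, h0⟩, ?_, ?_⟩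
      · rcases Nat.lt_or_ge (k * k) n with h | h
        · exact h
        · exfalso
          apply hne1
          have he : k * k = n := le_antisymm hkk h
          rw [← he, Nat.mul_div_cancel_left k hk0]
      · rintro rfl
        exact hne2 (Nat.div_one n)
    · rintro ⟨⟨hdvd, h0⟩, hlt, hne1⟩
      have hmul : k * (n / k) = n := Nat.mul_div_cancel' hdvd
      refine ⟨⟨hdvd, h0⟩, le_of_lt hlt, ?_, ?_⟩
      · intro he
        rw [he] at hmul
        omega
      · intro he
        rw [he] at hmul
        have hn' : 0 < n := by omega
        exact hne1 (Nat.eq_of_mul_eq_mul_right hn' (by omega))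
  have h3 : ∑ k ∈ n.divisors.filter (fun k => k * k < n ∧ k ≠ 1), n / k
      = ∑ k ∈ n.divisors.filter (fun k => n < k * k ∧ k ≠ n), k := by
    apply Finset.sum_nbij' (i := fun k => n / k) (j := fun k => n / k)
    · intro k hk
      simp only [Finset.mem_filter, Nat.mem_divisors] at hk ⊢
      obtain ⟨⟨hdvd, h0⟩, hlt, hne1⟩ := hk
      have hk0 : 0 < k := by
        rcases Nat.eq_zero_or_pos k with rfl | h
        · exact absurd (Nat.eq_zero_of_zero_dvd hdvd) hn0
        · exact h
      have hmul : k * (n / k) = n := Nat.mul_div_cancel' hdvd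
      have hmpos : 0 < n / k := by
        rcases Nat.eq_zero_or_pos (n / k) with h | h
        · rw [h, Nat.mul_zero] at hmul; omega
        · exact h
      refine ⟨⟨⟨k, (Nat.div_mul_cancel hdvd).symm⟩, h0⟩, ?_, ?_⟩
      · have hklt : k < n / k := by
          by_contra hcon
          push Not at hcon
          have h1' : k * (n / k) ≤ k * k := Nat.mul_le_mul_left k hcon
          rw [hmul] at h1'
          exact absurd (lt_of_le_of_lt h1' hlt) (lt_irrefl n)
        calc n = k * (n / k) := hmul.symm
          _ < n / k * (n / k) := Nat.mul_lt_mul_of_lt_of_le hklt (le_refl _) hmpos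
      · intro he
        rw [he] at hmul
        have hn' : 0 < n := by omega
        exact hne1 (Nat.eq_of_mul_eq_mul_right hn' (by omega))
    · intro k hk
      simp only [Finset.mem_filter, Nat.mem_divisors] at hk ⊢
      obtain ⟨⟨hdvd, h0⟩, hlt, hne1⟩ := hk
      have hk0 : 0 < k := by
        rcases Nat.eq_zero_or_pos k with rfl | h
        · exact absurd (Nat.eq_zero_of_zero_dvd hdvd) hn0
        · exact h
      have hmul : k * (n / k) = n := Nat.mul_div_cancel' hdvd
      have hmpos : 0 < n / k := by
        rcases Nat.eq_zero_or_pos (n / k) with h | h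
        · rw [h, Nat.mul_zero] at hmul; omega
        · exact h
      refine ⟨⟨⟨k, (Nat.div_mul_cancel hdvd).symm⟩, h0⟩, ?_, ?_⟩
      · have hklt : n / k < k := by
          by_contra hcon
          push Not at hcon
          have h1' : k * k ≤ k * (n / k) := Nat.mul_le_mul_left k hcon
          rw [hmul] at h1'
          exact absurd (lt_of_lt_of_le hlt h1') (lt_irrefl n)
        calc n / k * (n / k) < k * (n / k) := Nat.mul_lt_mul_of_lt_of_le hklt (le_refl _) hmpos
          _ = n := hmul
      · intro he
        rw [he, Nat.mul_one] at hmul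
        exact hne1 hmul
    · intro k hk
      simp only [Finset.mem_filter, Nat.mem_divisors] at hk
      exact Nat.div_div_self hk.1.1 hn0
    · intro k hk
      simp only [Finset.mem_filter, Nat.mem_divisors] at hk
      exact Nat.div_div_self hk.1.1 hn0
    · intro k hk
      rfl
  have h4 : n.properDivisors = n.divisors.filter (fun k => k ≠ n) := by
    ext k
    simp only [Nat.mem_properDivisors, Nat.mem_divisors, Finset.mem_filter]
    constructor
    · rintro ⟨hdvd, hlt⟩
      exact ⟨⟨hdvd, hn0⟩, by omega⟩
    · rintro ⟨⟨hdvd, -⟩, hne⟩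
      exact ⟨hdvd, lt_of_le_of_ne (Nat.le_of_dvd (by omega) hdvd) hne⟩
  have e1 : (n.divisors.filter (fun k => k ≠ n)).filter (fun k => k * k ≤ n)
      = n.divisors.filter (fun k => k * k ≤ n) := by
    rw [Finset.filter_filter]
    apply Finset.filter_congr
    intro k hk
    constructor
    · rintro ⟨-, h⟩; exact h
    · intro h
      refine ⟨?_, h⟩
      rintro rfl
      nlinarith
  have e2 : (n.divisors.filter (fun k => k ≠ n)).filter (fun k => ¬ k * k ≤ n)
      = n.divisors.filter (fun k => n < k * k ∧ k ≠ n) := by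
    rw [Finset.filter_filter]
    apply Finset.filter_congr
    intro k hk
    constructor
    · rintro ⟨hne, hle⟩; exact ⟨by omega, hne⟩
    · rintro ⟨hlt, hne⟩; exact ⟨hne, by omega⟩
  rw [h1, hfilter_eq, Finset.sum_add_distrib, h2, h3, h4,
      ← Finset.sum_filter_add_sum_filter_not (n.divisors.filter (fun k => k ≠ n))
        (fun k => k * k ≤ n) (fun k => k), e1, e2]

-- ===== VERDICT (by name: the statement is the Claim_ definition above) =====
theorem DiffFactorNonFactor_spec : Claim_equal_DiffFactorNonFactor := by
  intro value hdom
  unfold Spec_DiffFactorNonFactor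
  simp only [DiffFactorNonFactor, DiffFactorNonFactor_alt]
  by_cases h2 : value < 2
  · rw [if_pos h2, PySem.List.pyRange_one_eq_nil (by omega : value ≤ (1 : Int))]
    simp
  · rw [if_neg h2]
    have hv : value = ((value.toNat : Nat) : Int) := by omega
    set n := value.toNat with hndef
    have hn : 2 ≤ n := by omega
    have h1n : (1 : Nat) ≤ n := by omega
    -- divisibility bridge
    have hcond : ∀ k : Nat, (PySem.Int.mod value (1 + (k : Int)) = 0) ↔ (1 + k) ∣ n := by
      intro k
      have hcast : (1 + (k : Int)) = ((1 + k : Nat) : Int) := by push_cast; ring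
      rw [hv, hcast, PySem.Int.mod_natCast]
      constructor
      · intro h
        exact Nat.dvd_of_mod_eq_zero (by exact_mod_cast h)
      · intro h
        exact_mod_cast congrArg (fun x : Nat => (x : Int)) (Nat.mod_eq_zero_of_dvd h)
    -- the range list of A's loop
    have hr : PySem.List.pyRange 1 value 1
        = (List.range (n - 1)).map (fun k : Nat => (1 : Int) + (k : Int)) := by
      rw [PySem.List.pyRange_one]
      have he : (value - 1).toNat = n - 1 := by omega
      rw [he]
    -- proper-divisor sum as a shifted range sum
    have hF : ∑ k ∈ Finset.range (n - 1), (if (1 + k) ∣ n then 1 + k else 0)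
        = ∑ k ∈ n.properDivisors, k := by
      have hpd : n.properDivisors = (Finset.Ico 1 n).filter (fun d => d ∣ n) := by
        ext k
        simp only [Nat.mem_properDivisors, Finset.mem_filter, Finset.mem_Ico]
        constructor
        · rintro ⟨hdvd, hlt⟩
          have hk0 : k ≠ 0 := by
            rintro rfl
            exact (by omega : n ≠ 0) (Nat.eq_zero_of_zero_dvd hdvd)
          exact ⟨⟨by omega, hlt⟩, hdvd⟩
        · rintro ⟨⟨-, hlt⟩, hdvd⟩
          exact ⟨hdvd, hlt⟩
      rw [hpd, Finset.sum_filter, Finset.sum_Ico_eq_sum_range]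
    -- A's factor sum over the range equals the proper-divisor sum
    have hFeq : ∑ k ∈ Finset.range (n - 1),
          (if PySem.Int.mod value (1 + (k : Int)) = 0 then 1 + (k : Int) else 0)
        = ((∑ k ∈ n.properDivisors, k : Nat) : Int) := by
      have hpt : ∀ k ∈ Finset.range (n - 1),
          (if PySem.Int.mod value (1 + (k : Int)) = 0 then 1 + (k : Int) else 0)
          = (((if (1 + k) ∣ n then 1 + k else 0 : Nat)) : Int) := by
        intro k hk
        by_cases hd : (1 + k) ∣ n
        · rw [if_pos ((hcond k).mpr hd), if_pos hd]
          push_cast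
          ring
        · rw [if_neg (fun h => hd ((hcond k).mp h)), if_neg hd]
          simp
      rw [Finset.sum_congr rfl hpt, ← Nat.cast_sum, hF]
    -- triangular number
    have hTnat : ∑ k ∈ Finset.range (n - 1), (1 + k) = (n - 1) * n / 2 := by
      have hshift : ∑ i ∈ Finset.range n, i = ∑ k ∈ Finset.range (n - 1), (1 + k) := by
        have hs := Finset.sum_range_succ' (fun i => i) (n - 1)
        rw [show n - 1 + 1 = n by omega] at hs
        rw [hs]
        simp [Nat.add_comm]
      have hg := Finset.sum_range_id_mul_two n
      rw [hshift, Nat.mul_comm n (n - 1)] at hg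
      omega
    have hTsum : ∑ k ∈ Finset.range (n - 1), ((1 : Int) + k)
        = (((n - 1) * n / 2 : Nat) : Int) := by
      rw [← hTnat]
      push_cast
      rfl
    -- A's nonfactor sum
    have hNFeq : ∑ k ∈ Finset.range (n - 1),
          (if PySem.Int.mod value (1 + (k : Int)) = 0 then 0 else 1 + (k : Int))
        = (((n - 1) * n / 2 : Nat) : Int) - ((∑ k ∈ n.properDivisors, k : Nat) : Int) := by
      have hpt : ∀ k ∈ Finset.range (n - 1),
          (if PySem.Int.mod value (1 + (k : Int)) = 0 then (0 : Int) else 1 + (k : Int))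
          = (1 + (k : Int))
            - (if PySem.Int.mod value (1 + (k : Int)) = 0 then 1 + (k : Int) else 0) := by
        intro k hk
        split_ifs <;> ring
      rw [Finset.sum_congr rfl hpt, Finset.sum_sub_distrib, hFeq, hTsum]
    -- B's closed-form total
    have hTB : PySem.Int.floordiv ((value - 1) * value) 2 = (((n - 1) * n / 2 : Nat) : Int) := by
      have hvv : (value - 1) * value = (((n - 1) * n : Nat) : Int) := by
        rw [hv]
        push_cast [Nat.cast_sub h1n]
        ring
      rw [hvv]
      exact_mod_cast PySem.Int.floordiv_natCast ((n - 1) * n) 2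
    -- B's loop value
    have hB : pvFacLoop value 1 0 = ((∑ k ∈ n.properDivisors, k : Nat) : Int) := by
      rw [hv, facLoop_list n hn (((Nat.sqrt n : Int) + 1 - 1).toNat) 1 0 (le_refl 1) rfl,
          PySem.List.pyRange_one, List.map_map]
      have he : ((Nat.sqrt n : Int) + 1 - 1).toNat = Nat.sqrt n := by omega
      rw [he, list_range_map_sum]
      have hpt : ∀ k ∈ Finset.range (Nat.sqrt n),
          ((fun i => (pvContrib n i.toNat : Int)) ∘ (fun k : Nat => (1 : Int) + k)) k
          = ((pvContrib n (1 + k) : Nat) : Int) := by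
        intro k hk
        simp only [Function.comp]
        have hc : ((1 : Int) + (k : Int)).toNat = 1 + k := by omega
        rw [hc]
      rw [Finset.sum_congr rfl hpt, ← Nat.cast_sum]
      have hIco : ∑ k ∈ Finset.range (Nat.sqrt n), pvContrib n (1 + k)
          = ∑ k ∈ Finset.Ico 1 (Nat.sqrt n + 1), pvContrib n k := by
        rw [Finset.sum_Ico_eq_sum_range]
        simp
      rw [hIco, pairing n hn]
      exact zero_add _
    -- assemble
    rw [foldA_eq, hr, List.map_map, List.map_map, list_range_map_sum, list_range_map_sum]
    simp only [Function.comp]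
    rw [hFeq, hNFeq, hTB, hB]
    ring
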